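-- pv_equiv track=rewrite | github.com/glygener/glygen-backend-integration | ai-ready/make-ai-ready.py | collapse_matrix_rows
-- ===== SOURCE A (Python) =====
-- def collapse_matrix_rows(in_matrix, map_dict):
--
--     col_id_list = []
--     for row_id in in_matrix:
--         for col_id in in_matrix[row_id]:
--             if col_id not in col_id_list:
--                 col_id_list.append(col_id)
--
--     count_dict = {}
--     for row_id in in_matrix:
--         if row_id not in map_dict:
--             continue
--         if map_dict[row_id] == []:
--             map_dict[row_id] = ["other"]
--
--         for col_id in col_id_list:
--             val = in_matrix[row_id][col_id] if col_id in in_matrix[row_id] else 0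
--             for new_row_id in map_dict[row_id]:
--                 if new_row_id not in count_dict:
--                     count_dict[new_row_id] = {}
--                 if col_id not in count_dict[new_row_id]:
--                     count_dict[new_row_id][col_id] = 0
--                 count_dict[new_row_id][col_id] += val
--
--     return count_dict
-- ===== SOURCE B (Python) =====
-- def collapse_matrix_rows(in_matrix, map_dict):
--
--     col_ids = list(dict.fromkeys(c for row in in_matrix.values() for c in row))
--
--     mapped = []
--     for row_id in in_matrix:
--         if row_id in map_dict:
--             if map_dict[row_id] == []:
--                 map_dict[row_id] = ["other"]
--             mapped.append(row_id)
--
--     targets = list(dict.fromkeys(t for r in mapped for t in map_dict[r]))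
--
--     return {t: {c: sum(map_dict[r].count(t) * in_matrix[r].get(c, 0)
--                        for r in mapped)
--                 for c in col_ids}
--             for t in targets}
-- ===== Notes on version B (the rewrite author's own statement) =====
-- stated objective: alternative
-- what changed: A builds the result incrementally, mutating a nested count_dict cell by cell inside a dense triple loop over rows x global columns x targets; B computes the answer in closed form: it first collects the mapped row ids and the ordered target set, then materializes each output cell directly as an explicit sum over the mapped rows.
-- intended difference: When every row of in_matrix has an empty column dict but some row id is mapped by map_dict, A returns {} because its per-column loop never runs, while B returns each mapped target with an empty column dict, the intended 'target present, no columns' result. — e.g. on collapse_matrix_rows([("r", [])], [("r", ["x"])]): A returns [], B returns [("x", [])]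
import Mathlib
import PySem

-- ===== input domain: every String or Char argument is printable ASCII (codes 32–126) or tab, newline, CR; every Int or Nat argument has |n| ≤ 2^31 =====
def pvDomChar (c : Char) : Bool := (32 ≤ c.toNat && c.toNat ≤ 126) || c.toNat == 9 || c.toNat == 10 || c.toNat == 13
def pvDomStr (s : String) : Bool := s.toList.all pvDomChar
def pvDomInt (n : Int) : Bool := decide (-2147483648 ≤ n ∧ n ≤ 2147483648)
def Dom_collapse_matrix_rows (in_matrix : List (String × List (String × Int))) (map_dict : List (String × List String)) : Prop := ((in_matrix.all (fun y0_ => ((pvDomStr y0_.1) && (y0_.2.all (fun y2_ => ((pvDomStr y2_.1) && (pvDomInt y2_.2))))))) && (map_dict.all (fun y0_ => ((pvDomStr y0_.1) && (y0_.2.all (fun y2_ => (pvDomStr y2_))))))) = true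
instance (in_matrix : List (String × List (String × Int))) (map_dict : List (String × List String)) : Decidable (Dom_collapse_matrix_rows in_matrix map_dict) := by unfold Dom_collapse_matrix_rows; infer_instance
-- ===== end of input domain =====

-- A builds the result incrementally, adding into a nested count_dict cell by cell inside a
-- dense triple loop; B computes the answer in closed form: the mapped row list and the ordered
-- target set are computed first, then every output cell is materialized as an explicit sum over
-- the mapped rows (objective: alternative algorithm, not claimed faster).
-- Both A and B mutate map_dict in place ([] -> ["other"]); the equivalence proved here is about
-- the RETURN value only (B performs the same mutation in Python).

abbrev pvCD := PySem.Dict String (PySem.Dict String Int)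

-- ===== PORT A =====
-- col_id_list: 'if col_id not in col_id_list: col_id_list.append(col_id)' is PySem.Set.add
def pvCols (in_matrix : List (String × List (String × Int))) : List String :=
  in_matrix.foldl (fun acc p => p.2.foldl (fun acc q => PySem.Set.add acc q.1) acc) []

-- 'row[col_id] if col_id in row else 0' (dict lookup with default)
def pvG (row : List (String × Int)) (c : String) : Int := (PySem.Dict.mk row).getD c 0

-- one 'count_dict[new_row_id][col_id] += val' update, including creation of missing entries:
-- 'if new_row_id not in count_dict: ... = {}' / 'if col_id not in ...: ... = 0'
def pvUpdA (v : Int) (c : String) (cd : pvCD) (nr : String) : pvCD :=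
  let d := cd.getD nr PySem.Dict.empty
  cd.insert nr (d.insert c (d.getD c 0 + v))

-- one iteration of A's 'for row_id in in_matrix' loop; state = (map_dict, count_dict)
def pvRowStepA (cols : List String)
    (st : PySem.Dict String (List String) × pvCD)
    (p : String × List (String × Int)) :
    PySem.Dict String (List String) × pvCD :=
  match st.1.get? p.1 with
  | none => st
  | some ts0 =>
    let md := if ts0 = [] then st.1.insert p.1 ["other"] else st.1
    let ts := if ts0 = [] then ["other"] else ts0
    let cd := cols.foldl (fun cd c => ts.foldl (pvUpdA (pvG p.2 c) c) cd) st.2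
    (md, cd)

def collapse_matrix_rows (in_matrix : List (String × List (String × Int))) (map_dict : List (String × List String)) : List (String × List (String × Int)) :=
  let cols := pvCols in_matrix
  ((in_matrix.foldl (pvRowStepA cols) (PySem.Dict.mk map_dict, PySem.Dict.empty)).2).items.map
    (fun q => (q.1, q.2.items))

-- ===== PORT B =====
-- col_ids = list(dict.fromkeys(c for row in in_matrix.values() for c in row))
def pvColsB (in_matrix : List (String × List (String × Int))) : List String :=
  PySem.List.dedup (in_matrix.flatMap (fun p => p.2.map Prod.fst))

-- in_matrix[r].get(c, 0)
def pvGetB (row : List (String × Int)) (c : String) : Int :=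
  ((PySem.Dict.mk row).get? c).getD 0

-- one iteration of B's 'mapped' loop: skip unmapped ids, apply the []→["other"] mutation, record the id
def pvMapStepB (st : PySem.Dict String (List String) × List String) (r : String) :
    PySem.Dict String (List String) × List String :=
  match st.1.get? r with
  | none => st
  | some l => (if l = [] then st.1.insert r ["other"] else st.1, st.2 ++ [r])

-- the final two comprehensions: targets = list(dict.fromkeys(...)), then the nested dict
-- comprehension with sum(map_dict[r].count(t) * in_matrix[r].get(c, 0) for r in mapped)
def pvBuildB (imD : PySem.Dict String (List (String × Int))) (cols : List String)
    (md1 : PySem.Dict String (List String)) (mapped : List String) :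
    List (String × List (String × Int)) :=
  let targets := PySem.List.dedup (mapped.flatMap (fun r => md1.getD r []))
  targets.map (fun t => (t, cols.map (fun c =>
    (c, (mapped.map (fun r => ((md1.getD r []).count t : Int) * pvGetB (imD.getD r []) c)).sum))))

def collapse_matrix_rows_alt (in_matrix : List (String × List (String × Int))) (map_dict : List (String × List String)) : List (String × List (String × Int)) :=
  let st := (in_matrix.map Prod.fst).foldl pvMapStepB (PySem.Dict.mk map_dict, [])
  pvBuildB (PySem.Dict.mk in_matrix) (pvColsB in_matrix) st.1 st.2

-- ===== PRECONDITION & SPEC =====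
-- Pre_ excludes association lists carrying a duplicate key (in in_matrix, in one of its rows, or
-- in map_dict): such a list does not represent a Python dict, so first-match behaviour on it is
-- accidental.
def Pre_collapse_matrix_rows (in_matrix : List (String × List (String × Int))) (map_dict : List (String × List String)) : Prop :=
  (in_matrix.map Prod.fst).Nodup ∧ (∀ p ∈ in_matrix, (p.2.map Prod.fst).Nodup) ∧
    (map_dict.map Prod.fst).Nodup
instance (in_matrix : List (String × List (String × Int))) (map_dict : List (String × List String)) : Decidable (Pre_collapse_matrix_rows in_matrix map_dict) := by unfold Pre_collapse_matrix_rows; infer_instance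

def pvWitness_collapse_matrix_rows : (List (String × List (String × Int))) × (List (String × List String)) :=
  ([("r", [("a", 2), ("b", 3)]), ("s", [("b", 1)])], [("r", ["x"]), ("s", [])])

-- When every row of in_matrix has an empty column dict but some row id is mapped by map_dict,
-- A returns {} because its per-column loop never runs, while B returns each mapped target with
-- an empty column dict, the intended 'target present, no columns' result.
def D_collapse_matrix_rows (in_matrix : List (String × List (String × Int))) (map_dict : List (String × List String)) : Prop :=
  (∀ p ∈ in_matrix, p.2 = []) ∧ (∃ p ∈ in_matrix, p.1 ∈ map_dict.map Prod.fst)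
instance (in_matrix : List (String × List (String × Int))) (map_dict : List (String × List String)) : Decidable (D_collapse_matrix_rows in_matrix map_dict) := by unfold D_collapse_matrix_rows; infer_instance

def Spec_collapse_matrix_rows (in_matrix : List (String × List (String × Int))) (map_dict : List (String × List String)) (out : List (String × List (String × Int))) : Prop := ¬ D_collapse_matrix_rows in_matrix map_dict → out = collapse_matrix_rows_alt in_matrix map_dict
instance (in_matrix : List (String × List (String × Int))) (map_dict : List (String × List String)) (out : List (String × List (String × Int))) : Decidable (Spec_collapse_matrix_rows in_matrix map_dict out) := by unfold Spec_collapse_matrix_rows; infer_instance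

def pvDiffWitness_collapse_matrix_rows : (List (String × List (String × Int))) × (List (String × List String)) :=
  ([("r", [])], [("r", ["x"])])
def pvDiffWitnessOut_collapse_matrix_rows : (List (String × List (String × Int))) × (List (String × List (String × Int))) :=
  ([], [("x", [])])

-- ===== CLAIM (what is proved, stated in full; the proofs are below) =====
def Claim_unchanged_collapse_matrix_rows : Prop := ∀ (in_matrix : List (String × List (String × Int))) (map_dict : List (String × List String)), Dom_collapse_matrix_rows in_matrix map_dict → Pre_collapse_matrix_rows in_matrix map_dict → Spec_collapse_matrix_rows in_matrix map_dict (collapse_matrix_rows in_matrix map_dict)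
def Claim_changed_collapse_matrix_rows : Prop := Dom_collapse_matrix_rows (pvDiffWitness_collapse_matrix_rows.1) (pvDiffWitness_collapse_matrix_rows.2) ∧ Pre_collapse_matrix_rows (pvDiffWitness_collapse_matrix_rows.1) (pvDiffWitness_collapse_matrix_rows.2) ∧ D_collapse_matrix_rows (pvDiffWitness_collapse_matrix_rows.1) (pvDiffWitness_collapse_matrix_rows.2) ∧ collapse_matrix_rows (pvDiffWitness_collapse_matrix_rows.1) (pvDiffWitness_collapse_matrix_rows.2) = pvDiffWitnessOut_collapse_matrix_rows.1 ∧ collapse_matrix_rows_alt (pvDiffWitness_collapse_matrix_rows.1) (pvDiffWitness_collapse_matrix_rows.2) = pvDiffWitnessOut_collapse_matrix_rows.2 ∧ pvDiffWitnessOut_collapse_matrix_rows.1 ≠ pvDiffWitnessOut_collapse_matrix_rows.2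
def Claim_exact_collapse_matrix_rows : Prop := ∀ (in_matrix : List (String × List (String × Int))) (map_dict : List (String × List String)), Dom_collapse_matrix_rows in_matrix map_dict → Pre_collapse_matrix_rows in_matrix map_dict → D_collapse_matrix_rows in_matrix map_dict → collapse_matrix_rows in_matrix map_dict ≠ collapse_matrix_rows_alt in_matrix map_dict

-- ===== LEMMAS AND PROOFS =====
-- helpers reused from the canonical-form development
def pvNew : List String → List String → List String
  | [], _ => []
  | nr :: ts, ks => if nr ∈ ks then pvNew ts ks else nr :: pvNew ts (ks ++ [nr])

theorem pvNew_mem {x : String} : ∀ (ts ks : List String), x ∈ pvNew ts ks → x ∈ ts ∧ x ∉ ks := by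
  intro ts
  induction ts with
  | nil => intro ks h; simp [pvNew] at h
  | cons nr ts ih =>
    intro ks h
    by_cases hm : nr ∈ ks
    · simp only [pvNew, if_pos hm] at h
      rcases ih ks h with ⟨h1, h2⟩
      exact ⟨List.mem_cons_of_mem _ h1, h2⟩
    · simp only [pvNew, if_neg hm, List.mem_cons] at h
      rcases h with rfl | h
      · exact ⟨List.mem_cons_self, hm⟩
      · rcases ih _ h with ⟨h1, h2⟩
        exact ⟨List.mem_cons_of_mem _ h1, fun hx => h2 (List.mem_append.2 (Or.inl hx))⟩

theorem pvNew_nodup : ∀ (ts ks : List String), (pvNew ts ks).Nodup := by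
  intro ts
  induction ts with
  | nil => intro ks; simp [pvNew]
  | cons nr ts ih =>
    intro ks
    by_cases hm : nr ∈ ks
    · simpa [pvNew, if_pos hm] using ih ks
    · simp only [pvNew, if_neg hm, List.nodup_cons]
      refine ⟨fun hmem => ?_, ih _⟩
      have := (pvNew_mem _ _ hmem).2
      simp at this

theorem pvNew_total {k : String} : ∀ (ts ks : List String), k ∈ ts → k ∈ ks ∨ k ∈ pvNew ts ks := by
  intro ts
  induction ts with
  | nil => intro ks h; simp at h
  | cons nr ts ih =>
    intro ks h
    by_cases hm : nr ∈ ks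
    · simp only [pvNew, if_pos hm]
      rcases List.mem_cons.1 h with rfl | h
      · exact Or.inl hm
      · exact ih ks h
    · simp only [pvNew, if_neg hm]
      rcases List.mem_cons.1 h with rfl | h
      · exact Or.inr List.mem_cons_self
      · rcases ih (ks ++ [nr]) h with h' | h'
        · rcases List.mem_append.1 h' with h' | h'
          · exact Or.inl h'
          · simp at h'; subst h'; exact Or.inr List.mem_cons_self
        · exact Or.inr (List.mem_cons_of_mem _ h')

theorem pvNew_nil_of_subset : ∀ (ts ks : List String), (∀ k ∈ ts, k ∈ ks) → pvNew ts ks = [] := by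
  intro ts
  induction ts with
  | nil => intro ks _; rfl
  | cons nr ts ih =>
    intro ks h
    have hm : nr ∈ ks := h nr List.mem_cons_self
    simp only [pvNew, if_pos hm]
    exact ih ks (fun k hk => h k (List.mem_cons_of_mem _ hk))

theorem pvNew_cons_mem {nr : String} {ks : List String} (ts : List String) (h : nr ∈ ks) :
    pvNew (nr :: ts) ks = pvNew ts ks := by simp only [pvNew, if_pos h]

theorem pvNew_cons_not_mem {nr : String} {ks : List String} (ts : List String) (h : nr ∉ ks) :
    pvNew (nr :: ts) ks = nr :: pvNew ts (ks ++ [nr]) := by simp only [pvNew, if_neg h]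

-- small dictionary facts used throughout
theorem pv_mem_items_of_mem_keys {ν : Type} {d : PySem.Dict String ν} {k : String}
    (h : k ∈ d.keys) : ∃ v, (k, v) ∈ d.items := by
  have : k ∈ d.items.map Prod.fst := h
  rcases List.mem_map.1 this with ⟨q, hq, rfl⟩
  exact ⟨q.2, hq⟩

theorem pv_val_unique {ν : Type} {d : PySem.Dict String ν} (hnd : d.keys.Nodup) {k : String}
    {a b : ν} (ha : (k, a) ∈ d.items) (hb : (k, b) ∈ d.items) : a = b := by
  have h1 := PySem.Dict.get?_of_mem_items d ha hnd
  have h2 := PySem.Dict.get?_of_mem_items d hb hnd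
  rw [h1] at h2
  exact Option.some.inj h2

theorem pv_contains_false {ν : Type} {d : PySem.Dict String ν} {k : String} (h : k ∉ d.keys) :
    d.contains k = false := by
  cases hc : d.contains k
  · rfl
  · exact absurd ((PySem.Dict.contains_iff_mem_keys d k).1 hc) h

theorem pv_single_getD (c : String) (X d0 : Int) : (PySem.Dict.mk [(c, X)]).getD c d0 = X := by
  simp [PySem.Dict.getD_eq_get?_getD, PySem.Dict.get?_mk_cons]

theorem pv_single_insert (c : String) (X Y : Int) :
    (PySem.Dict.mk [(c, X)]).insert c Y = PySem.Dict.mk [(c, Y)] := by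
  apply PySem.Dict.ext
  rw [PySem.Dict.items_insert_of_contains _ Y (by simp [PySem.Dict.contains_mk])]
  simp

theorem pv_empty_insert (c : String) (Y : Int) :
    (PySem.Dict.empty : PySem.Dict String Int).insert c Y = PySem.Dict.mk [(c, Y)] := by
  apply PySem.Dict.ext
  rw [PySem.Dict.items_insert_of_not_contains _ Y (by simp)]
  rfl

theorem pv_count_cons_ne (k nr : String) (ts : List String) (h : k ≠ nr) :
    (nr :: ts).count k = ts.count k := by
  simp only [List.count_cons, beq_iff_eq, if_neg (fun hh : nr = k => h hh.symm), add_zero]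

theorem pv_count_cons_self (k : String) (ts : List String) :
    (k :: ts).count k = ts.count k + 1 := by simp

-- A's inner double loop over (cols × ts), characterized one column at a time
theorem pvInnerA_eq (v : Int) (c : String) :
    ∀ (ts : List String) (cd : pvCD), cd.keys.Nodup →
    ts.foldl (pvUpdA v c) cd
      = PySem.Dict.mk
          (cd.items.map (fun q => (q.1, if q.1 ∈ ts then q.2.insert c (q.2.getD c 0 + (ts.count q.1 : Int) * v) else q.2))
           ++ (pvNew ts cd.keys).map (fun k => (k, PySem.Dict.mk [(c, (ts.count k : Int) * v)]))) := by
  intro ts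
  induction ts with
  | nil =>
    intro cd hnd
    apply PySem.Dict.ext
    show cd.items = _
    simp [pvNew]
  | cons nr ts ih =>
    intro cd hnd
    rw [List.foldl_cons]
    by_cases hnr : nr ∈ cd.keys
    · obtain ⟨dnr, hdnr⟩ := pv_mem_items_of_mem_keys hnr
      have hcont : cd.contains nr = true := (PySem.Dict.contains_iff_mem_keys cd nr).2 hnr
      have hgetD : cd.getD nr PySem.Dict.empty = dnr := PySem.Dict.getD_of_mem_items cd hdnr hnd _
      have hstep : pvUpdA v c cd nr = cd.insert nr (dnr.insert c (dnr.getD c 0 + v)) := by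
        simp [pvUpdA, hgetD]
      set X := dnr.insert c (dnr.getD c 0 + v) with hX
      have hkeys : (cd.insert nr X).keys = cd.keys := PySem.Dict.keys_insert_of_contains cd X hcont
      have hnd' : (cd.insert nr X).keys.Nodup := hkeys ▸ hnd
      rw [hstep, ih _ hnd']
      apply PySem.Dict.ext
      show _ = _
      rw [hkeys, PySem.Dict.items_insert_of_contains cd X hcont]
      rw [show pvNew (nr :: ts) cd.keys = pvNew ts cd.keys by simp only [pvNew, if_pos hnr]]
      simp only [List.map_map]
      congr 1
      · apply List.map_congr_left
        intro q hq
        by_cases hqnr : q.1 = nr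
        · have hq2 : q.2 = dnr := pv_val_unique hnd (by rw [← hqnr]; exact hq) hdnr
          have h1 : (if (q.1 == nr) = true then (nr, X) else q) = (nr, X) := by simp [hqnr]
          simp only [Function.comp_apply, h1]
          rw [if_pos (show q.1 ∈ nr :: ts by simp [hqnr])]
          by_cases hts : nr ∈ ts
          · rw [if_pos hts]
            simp only [hX, PySem.Dict.getD_insert_self, PySem.Dict.insert_insert_self]
            rw [hq2, hqnr, pv_count_cons_self]
            congr 2
            push_cast
            ring
          · rw [if_neg hts, hq2, hX, hqnr, pv_count_cons_self,
              List.count_eq_zero_of_not_mem hts]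
            congr 2
            push_cast
            ring
        · have h1 : (if (q.1 == nr) = true then (nr, X) else q) = q := by simp [hqnr]
          simp only [Function.comp_apply, h1]
          have hmem : q.1 ∈ nr :: ts ↔ q.1 ∈ ts := by simp [List.mem_cons, hqnr]
          rw [pv_count_cons_ne _ _ _ hqnr]
          by_cases hts : q.1 ∈ ts
          · rw [if_pos hts, if_pos (hmem.2 hts)]
          · rw [if_neg hts, if_neg (fun h => hts (hmem.1 h))]
      · apply List.map_congr_left
        intro k hk
        have hknr : k ≠ nr := fun h => (pvNew_mem ts cd.keys hk).2 (h ▸ hnr)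
        rw [pv_count_cons_ne _ _ _ hknr]
    · have hcont : cd.contains nr = false := pv_contains_false hnr
      have hgetD : cd.getD nr PySem.Dict.empty = PySem.Dict.empty :=
        PySem.Dict.getD_of_not_contains cd _ hcont
      have hstep : pvUpdA v c cd nr = cd.insert nr (PySem.Dict.mk [(c, 0 + v)]) := by
        simp only [pvUpdA, hgetD, PySem.Dict.getD_empty, pv_empty_insert]
      set Z := PySem.Dict.mk [(c, (0 : Int) + v)] with hZ
      have hitems : (cd.insert nr Z).items = cd.items ++ [(nr, Z)] :=
        PySem.Dict.items_insert_of_not_contains cd Z hcont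
      have hkeys : (cd.insert nr Z).keys = cd.keys ++ [nr] := by
        show (cd.insert nr Z).items.map Prod.fst = _
        rw [hitems]; simp; rfl
      have hnd' : (cd.insert nr Z).keys.Nodup := by
        rw [hkeys, List.nodup_append]
        refine ⟨hnd, List.nodup_singleton _, ?_⟩
        intro a ha b hb
        rw [List.mem_singleton] at hb
        exact fun hab => hnr ((hab.trans hb) ▸ ha)
      rw [hstep, ih _ hnd']
      apply PySem.Dict.ext
      show _ = _
      rw [hkeys, hitems]
      rw [show pvNew (nr :: ts) cd.keys = nr :: pvNew ts (cd.keys ++ [nr]) by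
        simp only [pvNew, if_neg hnr]]
      simp only [List.map_append, List.map_cons, List.map_nil, List.append_assoc,
        List.nil_append, List.cons_append]
      congr 1
      · apply List.map_congr_left
        intro q hq
        have hqnr : q.1 ≠ nr := by
          intro h
          exact hnr (h ▸ (List.mem_map_of_mem hq : q.1 ∈ cd.items.map Prod.fst))
        have hmem : q.1 ∈ nr :: ts ↔ q.1 ∈ ts := by simp [List.mem_cons, hqnr]
        rw [pv_count_cons_ne _ _ _ hqnr]
        by_cases hts : q.1 ∈ ts
        · rw [if_pos hts, if_pos (hmem.2 hts)]
        · rw [if_neg hts, if_neg (fun h => hts (hmem.1 h))]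
      · congr 1
        · by_cases hts : nr ∈ ts
          · rw [if_pos hts, hZ, pv_single_getD, pv_single_insert, pv_count_cons_self]
            refine congrArg (fun z => ((nr : String), PySem.Dict.mk [(c, z)])) ?_
            push_cast
            ring
          · rw [if_neg hts, hZ, pv_count_cons_self, List.count_eq_zero_of_not_mem hts]
            refine congrArg (fun z => ((nr : String), PySem.Dict.mk [(c, z)])) ?_
            push_cast
            ring
        · apply List.map_congr_left
          intro k hk
          have hk2 := (pvNew_mem ts (cd.keys ++ [nr]) hk).2
          have hknr : k ≠ nr := by
            intro h
            exact hk2 (by simp [h])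
          rw [pv_count_cons_ne _ _ _ hknr]

def pvApply (g : String → Int) (cs : List String) (n : Int) (d : PySem.Dict String Int) :
    PySem.Dict String Int :=
  cs.foldl (fun d c => d.insert c (d.getD c 0 + n * g c)) d

theorem pvApply_full (g : String → Int) :
    ∀ (cs : List String) (n : Int) (d : PySem.Dict String Int), cs.Nodup → d.keys.Nodup →
    (∀ c ∈ cs, c ∈ d.keys) →
    pvApply g cs n d
      = PySem.Dict.mk (d.items.map (fun r => (r.1, if r.1 ∈ cs then r.2 + n * g r.1 else r.2))) := by
  intro cs
  induction cs with
  | nil =>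
    intro n d _ _ _
    apply PySem.Dict.ext
    show d.items = _
    simp
  | cons c cs ih =>
    intro n d hnd hdnd hsub
    have hc : c ∈ d.keys := hsub c List.mem_cons_self
    obtain ⟨rc, hrc⟩ := pv_mem_items_of_mem_keys hc
    have hcont : d.contains c = true := (PySem.Dict.contains_iff_mem_keys d c).2 hc
    have hgetD : d.getD c 0 = rc := PySem.Dict.getD_of_mem_items d hrc hdnd 0
    have hcnodup : c ∉ cs := (List.nodup_cons.1 hnd).1
    have hcsnd : cs.Nodup := (List.nodup_cons.1 hnd).2
    show pvApply g cs n (d.insert c (d.getD c 0 + n * g c)) = _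
    have hkeys : (d.insert c (d.getD c 0 + n * g c)).keys = d.keys :=
      PySem.Dict.keys_insert_of_contains d _ hcont
    rw [ih n _ hcsnd (by rw [hkeys]; exact hdnd) (fun c' hc' => by
      rw [hkeys]; exact hsub c' (List.mem_cons_of_mem _ hc'))]
    apply PySem.Dict.ext
    show _ = _
    rw [PySem.Dict.items_insert_of_contains d _ hcont]
    rw [List.map_map]
    apply List.map_congr_left
    intro r hr
    by_cases hrc1 : r.1 = c
    · have hr2 : r.2 = rc := pv_val_unique hdnd (by rw [← hrc1]; exact hr) hrc
      have h1 : (if (r.1 == c) = true then (c, d.getD c 0 + n * g c) else r)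
          = (c, d.getD c 0 + n * g c) := by simp [hrc1]
      simp only [Function.comp_apply, h1]
      rw [if_neg hcnodup, if_pos (show r.1 ∈ c :: cs by simp [hrc1]), hrc1, hgetD, hr2]
    · have h1 : (if (r.1 == c) = true then (c, d.getD c 0 + n * g c) else r) = r := by
        simp [hrc1]
      simp only [Function.comp_apply, h1]
      have hmem : r.1 ∈ c :: cs ↔ r.1 ∈ cs := by simp [List.mem_cons, hrc1]
      by_cases hcs : r.1 ∈ cs
      · rw [if_pos hcs, if_pos (hmem.2 hcs)]
      · rw [if_neg hcs, if_neg (fun h => hcs (hmem.1 h))]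

theorem pvApply_fresh (g : String → Int) :
    ∀ (cs : List String) (n : Int) (d : PySem.Dict String Int), cs.Nodup →
    (∀ c ∈ cs, c ∉ d.keys) →
    pvApply g cs n d = PySem.Dict.mk (d.items ++ cs.map (fun c => (c, n * g c))) := by
  intro cs
  induction cs with
  | nil =>
    intro n d _ _
    apply PySem.Dict.ext
    show d.items = _
    simp
  | cons c cs ih =>
    intro n d hnd hdis
    have hc : c ∉ d.keys := hdis c List.mem_cons_self
    have hcont : d.contains c = false := pv_contains_false hc
    have hstep : d.insert c (d.getD c 0 + n * g c) = PySem.Dict.mk (d.items ++ [(c, n * g c)]) := by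
      apply PySem.Dict.ext
      rw [PySem.Dict.items_insert_of_not_contains d _ hcont,
        PySem.Dict.getD_of_not_contains d _ hcont, zero_add]
    show pvApply g cs n (d.insert c (d.getD c 0 + n * g c)) = _
    rw [hstep]
    have hkeys : (PySem.Dict.mk (d.items ++ [(c, n * g c)])).keys = d.keys ++ [c] := by
      show (d.items ++ [(c, n * g c)]).map Prod.fst = _
      simp
      rfl
    rw [ih n _ (List.nodup_cons.1 hnd).2 (fun c' hc' => by
      rw [hkeys]
      intro hmem
      rcases List.mem_append.1 hmem with h | h
      · exact hdis c' (List.mem_cons_of_mem _ hc') h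
      · rw [List.mem_singleton] at h
        exact (List.nodup_cons.1 hnd).1 (h ▸ hc'))]
    apply PySem.Dict.ext
    show _ = _
    simp [List.append_assoc]

theorem pvColsFold_eq (g : String → Int) (ts : List String) :
    ∀ (cs : List String) (cd : pvCD), cd.keys.Nodup → (∀ k ∈ ts, k ∈ cd.keys) →
    cs.foldl (fun cd c => ts.foldl (pvUpdA (g c) c) cd) cd
      = PySem.Dict.mk (cd.items.map (fun q =>
          (q.1, if q.1 ∈ ts then pvApply g cs ((ts.count q.1 : Int)) q.2 else q.2))) := by
  intro cs
  induction cs with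
  | nil =>
    intro cd hnd _
    apply PySem.Dict.ext
    show cd.items = _
    simp [pvApply]
  | cons c cs ih =>
    intro cd hnd hsub
    rw [List.foldl_cons, pvInnerA_eq (g c) c ts cd hnd,
      pvNew_nil_of_subset ts cd.keys hsub]
    simp only [List.map_nil, List.append_nil]
    set f₀ := fun (q : String × PySem.Dict String Int) =>
      (q.1, if q.1 ∈ ts then q.2.insert c (q.2.getD c 0 + (ts.count q.1 : Int) * g c) else q.2)
      with hf₀
    have hkeys : (PySem.Dict.mk (cd.items.map f₀)).keys = cd.keys := by
      show (cd.items.map f₀).map Prod.fst = cd.items.map Prod.fst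
      rw [List.map_map]
      apply List.map_congr_left
      intro q _
      by_cases h : q.1 ∈ ts <;> simp [hf₀, h]
    rw [ih _ (by rw [hkeys]; exact hnd) (fun k hk => by rw [hkeys]; exact hsub k hk)]
    apply PySem.Dict.ext
    show _ = _
    rw [List.map_map]
    apply List.map_congr_left
    intro q _
    by_cases h : q.1 ∈ ts
    · simp only [Function.comp_apply, hf₀, h, if_true]
      rfl
    · simp only [Function.comp_apply, hf₀, h, if_false]

def pvCanVal (row : List (String × Int)) (n : Int) (d : PySem.Dict String Int) :
    PySem.Dict String Int :=
  PySem.Dict.mk (d.items.map (fun r => (r.1, r.2 + n * pvG row r.1)))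

def pvZeroB (cols : List String) : PySem.Dict String Int :=
  PySem.Dict.mk (cols.map (fun c => (c, (0 : Int))))

def pvCanStep (cols : List String) (row : List (String × Int)) (ts : List String) (cd : pvCD) :
    pvCD :=
  PySem.Dict.mk
    (cd.items.map (fun q => (q.1, if q.1 ∈ ts then pvCanVal row (ts.count q.1 : Int) q.2 else q.2))
     ++ (pvNew ts cd.keys).map (fun k => (k, pvCanVal row (ts.count k : Int) (pvZeroB cols))))

theorem pvApply_canVal (row : List (String × Int)) (cols : List String) (n : Int)
    (d : PySem.Dict String Int) (hcnd : cols.Nodup) (hk : d.keys = cols) :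
    pvApply (pvG row) cols n d = pvCanVal row n d := by
  rw [pvApply_full (pvG row) cols n d hcnd (by rw [hk]; exact hcnd)
    (fun c hc => by rw [hk]; exact hc)]
  apply PySem.Dict.ext
  show _ = _
  apply List.map_congr_left
  intro r hr
  have : r.1 ∈ cols := by
    rw [← hk]
    exact List.mem_map_of_mem hr
  rw [if_pos this]

theorem pvRowA_can (cols : List String) (row : List (String × Int)) (ts : List String)
    (cd : pvCD) (hne : cols ≠ []) (hcnd : cols.Nodup) (hnd : cd.keys.Nodup)
    (hfull : ∀ q ∈ cd.items, (q.2 : PySem.Dict String Int).keys = cols) :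
    cols.foldl (fun cd c => ts.foldl (pvUpdA (pvG row c) c) cd) cd = pvCanStep cols row ts cd := by
  obtain ⟨c₀, cs, rfl⟩ := List.exists_cons_of_ne_nil hne
  have hc₀cs : c₀ ∉ cs := (List.nodup_cons.1 hcnd).1
  have hcsnd : cs.Nodup := (List.nodup_cons.1 hcnd).2
  rw [List.foldl_cons, pvInnerA_eq (pvG row c₀) c₀ ts cd hnd]
  set A₁ := cd.items.map (fun q =>
    (q.1, if q.1 ∈ ts then q.2.insert c₀ (q.2.getD c₀ 0 + (ts.count q.1 : Int) * pvG row c₀)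
      else q.2)) with hA₁
  set B₁ := (pvNew ts cd.keys).map
    (fun k => (k, PySem.Dict.mk [(c₀, (ts.count k : Int) * pvG row c₀)])) with hB₁
  have hkeys : (PySem.Dict.mk (A₁ ++ B₁)).keys = cd.keys ++ pvNew ts cd.keys := by
    show (A₁ ++ B₁).map Prod.fst = _
    rw [List.map_append]
    congr 1
    · rw [hA₁, List.map_map]
      apply List.map_congr_left
      intro q _
      by_cases h : q.1 ∈ ts <;> simp [h]
    · rw [hB₁, List.map_map]
      simp [Function.comp_def]
  have hnd₁ : (PySem.Dict.mk (A₁ ++ B₁)).keys.Nodup := by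
    rw [hkeys, List.nodup_append]
    refine ⟨hnd, pvNew_nodup ts cd.keys, ?_⟩
    intro a ha b hb hab
    exact (pvNew_mem ts cd.keys hb).2 (hab ▸ ha)
  have hsub₁ : ∀ k ∈ ts, k ∈ (PySem.Dict.mk (A₁ ++ B₁)).keys := by
    intro k hk
    rw [hkeys, List.mem_append]
    exact pvNew_total ts cd.keys hk
  rw [pvColsFold_eq (pvG row) ts cs _ hnd₁ hsub₁]
  unfold pvCanStep
  refine congrArg PySem.Dict.mk ?_
  rw [show (PySem.Dict.mk (A₁ ++ B₁)).items = A₁ ++ B₁ from rfl, List.map_append]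
  congr 1
  · rw [hA₁, List.map_map]
    apply List.map_congr_left
    intro q hq
    by_cases h : q.1 ∈ ts
    · have h1 := pvApply_canVal row (c₀ :: cs) ((ts.count q.1 : Int)) q.2 hcnd (hfull q hq)
      simp only [Function.comp_apply, if_pos h]
      rw [← h1]
      rfl
    · simp only [Function.comp_apply, if_neg h]
  · rw [hB₁, List.map_map]
    apply List.map_congr_left
    intro k hk
    have hkts : k ∈ ts := (pvNew_mem ts cd.keys hk).1
    simp only [Function.comp_apply, if_pos hkts]
    rw [pvApply_fresh (pvG row) cs _ _ hcsnd (fun c hc => by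
      show c ∉ (PySem.Dict.mk [(c₀, (ts.count k : Int) * pvG row c₀)]).keys
      have : c ≠ c₀ := fun hcc => hc₀cs (hcc ▸ hc)
      simp [PySem.Dict.keys_mk, this])]
    refine congrArg (fun z => ((k : String), z)) ?_
    refine congrArg PySem.Dict.mk ?_
    show (c₀, (ts.count k : Int) * pvG row c₀) :: cs.map (fun c => (c, (ts.count k : Int) * pvG row c))
      = ((c₀ :: cs).map (fun c => (c, (0 : Int)))).map (fun r => (r.1, r.2 + (ts.count k : Int) * pvG row r.1))
    simp [List.map_map, zero_add]
theorem pvCanVal_mkmap (row : List (String × Int)) (n : Int) (cols : List String)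
    (V : String → Int) :
    pvCanVal row n (PySem.Dict.mk (cols.map (fun c => (c, V c))))
      = PySem.Dict.mk (cols.map (fun c => (c, V c + n * pvG row c))) := by
  unfold pvCanVal
  refine congrArg PySem.Dict.mk ?_
  show (cols.map _).map _ = _
  rw [List.map_map]
  rfl

-- the normalized target list of a mapped row id, read off the ORIGINAL map_dict
def pvTsl (M : PySem.Dict String (List String)) (r : String) : List String :=
  match M.get? r with
  | none => []
  | some l => if l = [] then ["other"] else l

def pvP (M : PySem.Dict String (List String)) (p : String × List (String × Int)) : Bool :=
  (M.get? p.1).isSome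

-- abstract evolution of the target list across one row of A's outer loop
def pvTstep (M : PySem.Dict String (List String)) (T : List String)
    (p : String × List (String × Int)) : List String :=
  if pvP M p then T ++ pvNew (pvTsl M p.1) T else T

-- the closed-form cell value: total contribution of the given rows to target t, column c
def pvS (M : PySem.Dict String (List String)) (rows : List (String × List (String × Int)))
    (t c : String) : Int :=
  ((rows.filter (pvP M)).map (fun p => ((pvTsl M p.1).count t : Int) * pvG p.2 c)).sum

theorem pvS_cons_neg {M : PySem.Dict String (List String)} {p : String × List (String × Int)}
    (rows : List (String × List (String × Int))) (t c : String) (h : pvP M p = false) :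
    pvS M (p :: rows) t c = pvS M rows t c := by
  simp [pvS, List.filter_cons, h]

theorem pvS_cons_pos {M : PySem.Dict String (List String)} {p : String × List (String × Int)}
    (rows : List (String × List (String × Int))) (t c : String) (h : pvP M p = true) :
    pvS M (p :: rows) t c = ((pvTsl M p.1).count t : Int) * pvG p.2 c + pvS M rows t c := by
  simp [pvS, List.filter_cons, h]

-- A's whole fold, characterized in closed form
theorem pvAfold (M : PySem.Dict String (List String)) (cols : List String)
    (hne : cols ≠ []) (hcnd : cols.Nodup) :
    ∀ (rows : List (String × List (String × Int)))
      (st : PySem.Dict String (List String) × pvCD) (T : List String)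
      (V : String → String → Int),
    (rows.map Prod.fst).Nodup →
    (∀ p ∈ rows, ∀ q ∈ p.2, q.1 ∈ cols) →
    (∀ p ∈ rows, st.1.get? p.1 = M.get? p.1) →
    T.Nodup →
    (∀ t, t ∉ T → ∀ c, V t c = 0) →
    st.2.items = T.map (fun t => (t, PySem.Dict.mk (cols.map (fun c => (c, V t c))))) →
    (rows.foldl (pvRowStepA cols) st).2.items
      = (rows.foldl (pvTstep M) T).map
          (fun t => (t, PySem.Dict.mk (cols.map (fun c => (c, V t c + pvS M rows t c))))) := by
  intro rows
  induction rows with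
  | nil =>
    intro st T V _ _ _ _ _ hitems
    simpa [pvS] using hitems
  | cons p rows ih =>
    intro st T V hknd hrowsub hlook hTnd hV0 hitems
    have hp1 : p.1 ∉ rows.map Prod.fst := by
      have := hknd
      simp only [List.map_cons, List.nodup_cons] at this
      exact this.1
    have hknd' : (rows.map Prod.fst).Nodup := by
      have := hknd
      simp only [List.map_cons, List.nodup_cons] at this
      exact this.2
    have hkeys : st.2.keys = T := by
      show st.2.items.map Prod.fst = T
      rw [hitems, List.map_map]
      simp [Function.comp_def]
    have hfull : ∀ q ∈ st.2.items, (q.2 : PySem.Dict String Int).keys = cols := by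
      intro q hq
      rw [hitems] at hq
      rcases List.mem_map.1 hq with ⟨t, _, rfl⟩
      show (cols.map _).map Prod.fst = cols
      rw [List.map_map]
      simp [Function.comp_def]
    cases hM : M.get? p.1 with
    | none =>
      have hstep : pvRowStepA cols st p = st := by
        unfold pvRowStepA
        rw [hlook p List.mem_cons_self, hM]
      have hP : pvP M p = false := by simp [pvP, hM]
      rw [List.foldl_cons, List.foldl_cons, hstep,
        show pvTstep M T p = T by simp [pvTstep, hP],
        ih st T V hknd' (fun r hr => hrowsub r (List.mem_cons_of_mem _ hr))
          (fun r hr => hlook r (List.mem_cons_of_mem _ hr)) hTnd hV0 hitems]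
      apply List.map_congr_left
      intro t _
      refine congrArg (fun z => (t, PySem.Dict.mk z)) ?_
      apply List.map_congr_left
      intro c _
      rw [pvS_cons_neg rows t c hP]
    | some l =>
      have hlookp : st.1.get? p.1 = some l := (hlook p List.mem_cons_self).trans hM
      have hP : pvP M p = true := by simp [pvP, hM]
      set ts := if l = [] then ["other"] else l with hts_def
      have hts2 : pvTsl M p.1 = ts := by simp only [pvTsl, hM]; exact hts_def.symm
      have hstep : pvRowStepA cols st p
          = ((if l = [] then st.1.insert p.1 ["other"] else st.1),
             pvCanStep cols p.2 ts st.2) := by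
        unfold pvRowStepA
        rw [hlookp]
        show ((if l = [] then st.1.insert p.1 ["other"] else st.1),
          cols.foldl (fun cd c => ts.foldl (pvUpdA (pvG p.2 c) c) cd) st.2) = _
        rw [pvRowA_can cols p.2 ts st.2 hne hcnd (by rw [hkeys]; exact hTnd) hfull]
      set V' : String → String → Int :=
        fun t c => V t c + (ts.count t : Int) * pvG p.2 c with hV'
      set T' := T ++ pvNew ts T with hT'
      have hitems' : (pvCanStep cols p.2 ts st.2).items
          = T'.map (fun t => (t, PySem.Dict.mk (cols.map (fun c => (c, V' t c))))) := by
        show st.2.items.map _ ++ (pvNew ts st.2.keys).map _ = _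
        rw [hitems, hkeys, hT', List.map_append, List.map_map]
        congr 1
        · apply List.map_congr_left
          intro t _
          by_cases hmem : t ∈ ts
          · simp only [Function.comp_apply, if_pos hmem]
            rw [pvCanVal_mkmap]
          · simp only [Function.comp_apply, if_neg hmem]
            have hc0 : ts.count t = 0 := List.count_eq_zero_of_not_mem hmem
            refine congrArg (fun z => (t, PySem.Dict.mk z)) ?_
            apply List.map_congr_left
            intro c _
            simp [hV', hc0]
        · apply List.map_congr_left
          intro k hk
          have hk0 : k ∉ T := (pvNew_mem ts T hk).2
          rw [show pvZeroB cols = PySem.Dict.mk (cols.map (fun c => (c, (0 : Int)))) from rfl,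
            pvCanVal_mkmap]
          refine congrArg (fun z => (k, PySem.Dict.mk z)) ?_
          apply List.map_congr_left
          intro c _
          simp [hV', hV0 k hk0 c]
      have hT'nd : T'.Nodup := by
        rw [hT', List.nodup_append]
        refine ⟨hTnd, pvNew_nodup ts T, ?_⟩
        intro a ha b hb hab
        exact (pvNew_mem ts T hb).2 (hab ▸ ha)
      have hV'0 : ∀ t, t ∉ T' → ∀ c, V' t c = 0 := by
        intro t ht c
        have htT : t ∉ T := fun h => ht (List.mem_append.2 (Or.inl h))
        have htts : t ∉ ts := by
          intro h
          rcases pvNew_total ts T h with h' | h'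
          · exact htT h'
          · exact ht (List.mem_append.2 (Or.inr h'))
        simp [hV', hV0 t htT c, List.count_eq_zero_of_not_mem htts]
      have hlook' : ∀ r ∈ rows, (pvRowStepA cols st p).1.get? r.1 = M.get? r.1 := by
        intro r hr
        have hner : r.1 ≠ p.1 := by
          intro he
          exact hp1 (he ▸ List.mem_map_of_mem hr)
        rw [hstep]
        show (if l = [] then st.1.insert p.1 ["other"] else st.1).get? r.1 = _
        split_ifs with h
        · rw [PySem.Dict.get?_insert_of_ne _ _ hner]
          exact hlook r (List.mem_cons_of_mem _ hr)
        · exact hlook r (List.mem_cons_of_mem _ hr)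
      rw [List.foldl_cons, List.foldl_cons,
        show pvTstep M T p = T' by simp [pvTstep, hP, hts2, hT']]
      rw [ih (pvRowStepA cols st p) T' V' hknd'
        (fun r hr => hrowsub r (List.mem_cons_of_mem _ hr)) hlook' hT'nd hV'0
        (by rw [hstep]; exact hitems')]
      apply List.map_congr_left
      intro t _
      refine congrArg (fun z => (t, PySem.Dict.mk z)) ?_
      apply List.map_congr_left
      intro c _
      refine congrArg (fun z => (c, z)) ?_
      rw [pvS_cons_pos rows t c hP, hts2, hV']
      ring
-- B's 'mapped' loop, characterized: the collected ids and the final map_dict lookups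
theorem pvMapFold : ∀ (keys : List String) (m0 : PySem.Dict String (List String))
    (acc : List String), keys.Nodup →
    (keys.foldl pvMapStepB (m0, acc)).2 = acc ++ keys.filter (fun r => (m0.get? r).isSome) ∧
    ∀ x, (keys.foldl pvMapStepB (m0, acc)).1.get? x
        = if x ∈ keys then (m0.get? x).map (fun l => if l = [] then ["other"] else l)
          else m0.get? x := by
  intro keys
  induction keys with
  | nil =>
    intro m0 acc _
    exact ⟨by simp, fun x => by simp⟩
  | cons r keys ih =>
    intro m0 acc hnd
    have hrk : r ∉ keys := (List.nodup_cons.1 hnd).1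
    have hknd : keys.Nodup := (List.nodup_cons.1 hnd).2
    rw [List.foldl_cons]
    cases hM : m0.get? r with
    | none =>
      have hstepeq : pvMapStepB (m0, acc) r = (m0, acc) := by
        show (match m0.get? r with
          | none => (m0, acc)
          | some l => (if l = [] then m0.insert r ["other"] else m0, acc ++ [r])) = (m0, acc)
        rw [hM]
      rw [hstepeq]
      obtain ⟨h2, h1⟩ := ih m0 acc hknd
      refine ⟨?_, ?_⟩
      · rw [h2, List.filter_cons]
        simp [hM]
      · intro x
        rw [h1 x]
        by_cases hx : x ∈ keys
        · rw [if_pos hx, if_pos (List.mem_cons_of_mem _ hx)]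
        · rw [if_neg hx]
          by_cases hxr : x = r
          · subst hxr
            rw [if_pos List.mem_cons_self, hM]
            rfl
          · rw [if_neg (by simp [hxr, hx])]
    | some l =>
      set m1 := if l = [] then m0.insert r ["other"] else m0 with hm1
      have hstepeq : pvMapStepB (m0, acc) r = (m1, acc ++ [r]) := by
        show (match m0.get? r with
          | none => (m0, acc)
          | some l => (if l = [] then m0.insert r ["other"] else m0, acc ++ [r]))
          = (m1, acc ++ [r])
        rw [hM]
      have hm1get : ∀ x, x ≠ r → m1.get? x = m0.get? x := by
        intro x hx
        rw [hm1]
        split_ifs with h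
        · exact PySem.Dict.get?_insert_of_ne _ _ hx
        · rfl
      have hm1r : m1.get? r = some (if l = [] then ["other"] else l) := by
        rw [hm1]
        split_ifs with h
        · rw [PySem.Dict.get?_insert_self]
        · rw [hM]
      rw [hstepeq]
      obtain ⟨h2, h1⟩ := ih m1 (acc ++ [r]) hknd
      refine ⟨?_, ?_⟩
      · rw [h2, List.filter_cons]
        rw [List.filter_congr (fun x hx => by rw [hm1get x (fun he => hrk (he ▸ hx))])]
        simp [hM]
      · intro x
        rw [h1 x]
        by_cases hx : x ∈ keys
        · rw [if_pos hx, if_pos (List.mem_cons_of_mem _ hx),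
            hm1get x (fun he => hrk (he ▸ hx))]
        · rw [if_neg hx]
          by_cases hxr : x = r
          · subst hxr
            rw [if_pos List.mem_cons_self, hm1r, hM]
            rfl
          · rw [if_neg (by simp [hxr, hx]), hm1get x hxr]

-- building a set by repeated add appends exactly the new elements
theorem pv_foldl_add_eq : ∀ (ts T : List String),
    ts.foldl PySem.Set.add T = T ++ pvNew ts T := by
  intro ts
  induction ts with
  | nil => intro T; simp [pvNew]
  | cons nr ts ih =>
    intro T
    rw [List.foldl_cons]
    by_cases h : nr ∈ T
    · rw [PySem.Set.add_of_mem h, ih T, pvNew_cons_mem ts h]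
    · rw [PySem.Set.add_of_not_mem h, ih (T ++ [nr]), pvNew_cons_not_mem ts h,
        List.append_assoc]
      rfl

-- the two column collectors agree
theorem pvColsB_eq (im : List (String × List (String × Int))) : pvColsB im = pvCols im := by
  unfold pvColsB pvCols
  rw [PySem.List.dedup_eq_ofList, PySem.Set.ofList_eq_foldl, List.foldl_flatMap]
  apply PySem.List.foldl_congr_mem
  intro acc p _
  exact List.foldl_map

theorem pvCols_nodup (im : List (String × List (String × Int))) : (pvCols im).Nodup := by
  rw [← pvColsB_eq]
  unfold pvColsB
  rw [PySem.List.dedup_eq_ofList]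
  exact PySem.Set.nodup_ofList _

theorem pvCols_mem (im : List (String × List (String × Int))) :
    ∀ p ∈ im, ∀ q ∈ p.2, q.1 ∈ pvCols im := by
  intro p hp q hq
  rw [← pvColsB_eq]
  unfold pvColsB
  rw [PySem.List.mem_dedup]
  exact List.mem_flatMap.2 ⟨p, hp, List.mem_map_of_mem hq⟩

theorem pvCols_nil (im : List (String × List (String × Int))) (h : pvCols im = []) :
    ∀ p ∈ im, p.2 = [] := by
  intro p hp
  cases hq : p.2 with
  | nil => rfl
  | cons q l =>
    have := pvCols_mem im p hp q (by rw [hq]; exact List.mem_cons_self)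
    rw [h] at this
    simp at this

theorem pvCols_nil_of_empty (im : List (String × List (String × Int)))
    (h : ∀ p ∈ im, p.2 = []) : pvCols im = [] := by
  rw [← pvColsB_eq]
  unfold pvColsB
  rw [show im.flatMap (fun p => p.2.map Prod.fst) = [] by
    rw [List.flatMap_eq_nil_iff]
    intro p hp
    rw [h p hp]
    rfl]
  rfl

-- when no row id is mapped, A's loop leaves the state untouched
theorem pvFoldA_skip (cols : List String) :
    ∀ (rows : List (String × List (String × Int)))
      (st : PySem.Dict String (List String) × pvCD),
    (∀ p ∈ rows, st.1.get? p.1 = none) → rows.foldl (pvRowStepA cols) st = st := by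
  intro rows
  induction rows with
  | nil => intro st _; rfl
  | cons p rows ih =>
    intro st h
    have hstep : pvRowStepA cols st p = st := by
      unfold pvRowStepA
      rw [h p List.mem_cons_self]
    rw [List.foldl_cons, hstep]
    exact ih st (fun r hr => h r (List.mem_cons_of_mem _ hr))

-- with no columns at all, A's inner loops never run: count_dict stays empty
theorem pvFoldA_cd_nil (cols : List String) (hc : cols = []) :
    ∀ (rows : List (String × List (String × Int)))
      (st : PySem.Dict String (List String) × pvCD),
    (rows.foldl (pvRowStepA cols) st).2 = st.2 := by
  intro rows
  induction rows with
  | nil => intro st; rfl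
  | cons p rows ih =>
    intro st
    rw [List.foldl_cons, ih]
    unfold pvRowStepA
    cases h : st.1.get? p.1 with
    | none => rfl
    | some ts0 =>
      show (cols.foldl _ st.2) = st.2
      rw [hc]
      rfl
-- B, characterized in the same closed form (Pre_: in_matrix keys are distinct)
theorem pvAlt_closed (im : List (String × List (String × Int)))
    (md : List (String × List String)) (hmk : (im.map Prod.fst).Nodup) :
    collapse_matrix_rows_alt im md
      = (im.foldl (pvTstep (PySem.Dict.mk md)) []).map
          (fun t => (t, (pvCols im).map (fun c => (c, pvS (PySem.Dict.mk md) im t c)))) := by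
  obtain ⟨hmapped, hmd1⟩ :=
    pvMapFold (im.map Prod.fst) (PySem.Dict.mk md) [] hmk
  set M := PySem.Dict.mk md with hM
  set st := (im.map Prod.fst).foldl pvMapStepB (M, []) with hst
  have hm : st.2 = (im.filter (pvP M)).map Prod.fst := by
    rw [hmapped, List.nil_append, List.filter_map]
    rfl
  have hget : ∀ r ∈ im.map Prod.fst, st.1.getD r [] = pvTsl M r := by
    intro r hr
    rw [PySem.Dict.getD_eq_get?_getD, hmd1 r, if_pos hr]
    cases h : M.get? r <;> simp [pvTsl, h]
  have hflat : st.2.flatMap (fun r => st.1.getD r [])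
      = (im.filter (pvP M)).flatMap (fun p => pvTsl M p.1) := by
    rw [hm, List.flatMap_def, List.flatMap_def, List.map_map]
    congr 1
    apply List.map_congr_left
    intro p hp
    exact hget p.1 (List.mem_map_of_mem (List.mem_of_mem_filter hp))
  have htgt : PySem.List.dedup (st.2.flatMap (fun r => st.1.getD r []))
      = im.foldl (pvTstep M) [] := by
    rw [hflat, PySem.List.dedup_eq_ofList, PySem.Set.ofList_eq_foldl, List.foldl_flatMap]
    have e1 : (im.filter (pvP M)).foldl
          (fun acc p => (pvTsl M p.1).foldl PySem.Set.add acc) []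
        = (im.filter (pvP M)).foldl
          (fun acc p => acc ++ pvNew (pvTsl M p.1) acc) [] :=
      PySem.List.foldl_congr_mem (im.filter (pvP M))
        (fun acc p => (pvTsl M p.1).foldl PySem.Set.add acc)
        (fun acc p => acc ++ pvNew (pvTsl M p.1) acc) []
        (fun acc p _ => pv_foldl_add_eq _ _)
    have e2 : im.foldl (pvTstep M) []
        = (im.filter (pvP M)).foldl
          (fun acc p => acc ++ pvNew (pvTsl M p.1) acc) [] :=
      PySem.List.foldl_if_eq_foldl_filter (pvP M)
        (fun acc p => acc ++ pvNew (pvTsl M p.1) acc) im []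
    exact e1.trans e2.symm
  have hsum : ∀ t c,
      (st.2.map (fun r => ((st.1.getD r []).count t : Int)
        * pvGetB ((PySem.Dict.mk im).getD r []) c)).sum = pvS M im t c := by
    intro t c
    rw [hm, List.map_map]
    unfold pvS
    congr 1
    apply List.map_congr_left
    intro p hp
    have hpim : p ∈ im := List.mem_of_mem_filter hp
    have hk : p.1 ∈ im.map Prod.fst := List.mem_map_of_mem hpim
    have hrow : (PySem.Dict.mk im).getD p.1 [] = p.2 := by
      apply PySem.Dict.getD_of_mem_items
      · show (p.1, p.2) ∈ im
        simpa using hpim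
      · show (im.map Prod.fst).Nodup
        exact hmk
    show ((st.1.getD p.1 []).count t : Int) * pvGetB ((PySem.Dict.mk im).getD p.1 []) c
      = ((pvTsl M p.1).count t : Int) * pvG p.2 c
    rw [hget p.1 hk, hrow]
    congr 1
  show pvBuildB (PySem.Dict.mk im) (pvColsB im) st.1 st.2 = _
  unfold pvBuildB
  rw [htgt, pvColsB_eq]
  apply List.map_congr_left
  intro t _
  refine congrArg (fun z => (t, z)) ?_
  apply List.map_congr_left
  intro c _
  refine congrArg (fun z => (c, z)) ?_
  exact hsum t c

theorem pvTstep_ne (M : PySem.Dict String (List String)) (T : List String)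
    (p : String × List (String × Int)) (hT : T ≠ []) : pvTstep M T p ≠ [] := by
  unfold pvTstep
  split_ifs
  · intro h
    exact hT (List.append_eq_nil_iff.1 h).1
  · exact hT

theorem pvTfold_ne (M : PySem.Dict String (List String)) :
    ∀ (rows : List (String × List (String × Int))) (T : List String),
    ((∃ p ∈ rows, pvP M p = true ∧ pvTsl M p.1 ≠ []) ∨ T ≠ []) →
    rows.foldl (pvTstep M) T ≠ [] := by
  intro rows
  induction rows with
  | nil =>
    intro T h
    rcases h with ⟨p, hp, _⟩ | h
    · simp at hp
    · simpa using h
  | cons p rows ih =>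
    intro T h
    rw [List.foldl_cons]
    rcases h with ⟨q, hq, hqP, hqts⟩ | hT
    · rcases List.mem_cons.1 hq with rfl | hq
      · apply ih
        right
        simp only [pvTstep, hqP, if_true]
        intro hcontra
        obtain ⟨h1, h2⟩ := List.append_eq_nil_iff.1 hcontra
        subst h1
        cases hts : pvTsl M q.1 with
        | nil => exact hqts hts
        | cons a l =>
          rw [hts] at h2
          simp [pvNew] at h2
      · exact ih _ (Or.inl ⟨q, hq, hqP, hqts⟩)
    · exact ih _ (Or.inr (pvTstep_ne M T p hT))

-- ===== VERDICT (by name: the statements are the Claim_ definitions above) =====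
theorem collapse_matrix_rows_spec : Claim_unchanged_collapse_matrix_rows := by
  intro im md _hdom hpre
  unfold Spec_collapse_matrix_rows
  intro hnD
  obtain ⟨hmk, _hrownd, _hmdnd⟩ := hpre
  rw [pvAlt_closed im md hmk]
  by_cases hc : pvCols im = []
  · have hempty := pvCols_nil im hc
    have hnomap : ∀ p ∈ im, (PySem.Dict.mk md).get? p.1 = none := by
      intro p hp
      rw [PySem.Dict.get?_eq_none_iff_not_mem_keys]
      intro hmem
      exact hnD ⟨hempty, p, hp, by simpa using hmem⟩
    have hA : collapse_matrix_rows im md = [] := by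
      unfold collapse_matrix_rows
      show ((im.foldl (pvRowStepA (pvCols im)) (PySem.Dict.mk md, PySem.Dict.empty)).2).items.map
        (fun q => (q.1, q.2.items)) = []
      rw [pvFoldA_skip _ im _ hnomap]
      rfl
    have hT : im.foldl (pvTstep (PySem.Dict.mk md)) [] = [] := by
      have h0 := PySem.List.foldl_if_eq_foldl_filter (pvP (PySem.Dict.mk md))
        (fun (acc : List String) p => acc ++ pvNew (pvTsl (PySem.Dict.mk md) p.1) acc) im
        ([] : List String)
      rw [List.filter_eq_nil_iff.2 (fun p hp => by simp [pvP, hnomap p hp])] at h0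
      exact h0
    rw [hA, hT]
    rfl
  · have hcnd := pvCols_nodup im
    have hA := pvAfold (PySem.Dict.mk md) (pvCols im) hc hcnd im
      (PySem.Dict.mk md, PySem.Dict.empty) [] (fun _ _ => 0) hmk (pvCols_mem im)
      (fun _ _ => rfl) List.nodup_nil (fun _ _ _ => rfl) rfl
    unfold collapse_matrix_rows
    show ((im.foldl (pvRowStepA (pvCols im)) (PySem.Dict.mk md, PySem.Dict.empty)).2).items.map
        (fun q => (q.1, q.2.items)) = _
    rw [hA, List.map_map]
    apply List.map_congr_left
    intro t _
    show (t, (PySem.Dict.mk ((pvCols im).map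
        (fun c => (c, 0 + pvS (PySem.Dict.mk md) im t c)))).items)
      = (t, (pvCols im).map (fun c => (c, pvS (PySem.Dict.mk md) im t c)))
    refine congrArg (fun z => (t, z)) ?_
    show (pvCols im).map (fun c => (c, 0 + pvS (PySem.Dict.mk md) im t c)) = _
    apply List.map_congr_left
    intro c _
    rw [zero_add]

theorem collapse_matrix_rows_tight : Claim_exact_collapse_matrix_rows := by
  intro im md _hdom hpre hD heq
  obtain ⟨hempty, p₀, hp₀, hmem₀⟩ := hD
  have hc : pvCols im = [] := pvCols_nil_of_empty im hempty
  have hA : collapse_matrix_rows im md = [] := by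
    unfold collapse_matrix_rows
    show ((im.foldl (pvRowStepA (pvCols im)) (PySem.Dict.mk md, PySem.Dict.empty)).2).items.map
      (fun q => (q.1, q.2.items)) = []
    rw [pvFoldA_cd_nil (pvCols im) hc im _]
    rfl
  have hsome : ∃ l, (PySem.Dict.mk md).get? p₀.1 = some l := by
    rcases Option.eq_none_or_eq_some ((PySem.Dict.mk md).get? p₀.1) with h | h
    · exact absurd ((PySem.Dict.get?_eq_none_iff_not_mem_keys _ _).1 h) (by simpa using hmem₀)
    · exact h
  obtain ⟨l, hl⟩ := hsome
  have hB : collapse_matrix_rows_alt im md ≠ [] := by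
    rw [pvAlt_closed im md hpre.1]
    intro hmap
    rw [List.map_eq_nil_iff] at hmap
    refine pvTfold_ne (PySem.Dict.mk md) im []
      (Or.inl ⟨p₀, hp₀, by simp [pvP, hl], ?_⟩) hmap
    simp only [pvTsl, hl]
    split_ifs with h
    · simp
    · exact h
  exact hB (heq.symm.trans hA)

theorem collapse_matrix_rows_changed : Claim_changed_collapse_matrix_rows := by
  unfold Claim_changed_collapse_matrix_rows; decide
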